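-- pv_equiv track=rewrite | github.com/KariukiSAN/Individual-Katas | solution.py | find_smallest_subarray
-- ===== SOURCE A (Python) =====
-- def find_smallest_subarray(arr):
--     if all_same(arr) or is_sorted(arr):
--         return [0, 0]
--
--     n = len(arr)
--     start, end = 0, n - 1
--
--     while start < n - 1 and arr[start] <= arr[start + 1]:
--         start += 1
--
--     while end > 0 and arr[end] >= arr[end - 1]:
--         end -= 1
--
--     subarray_min = min(arr[start:end+1])
--     subarray_max = max(arr[start:end+1])
--
--     while start > 0 and arr[start - 1] > subarray_min:
--         start -= 1
--
--     while end < n - 1 and arr[end + 1] < subarray_max: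
--         end += 1
--
--     return [start, end]
--
-- def all_same(arr):
--     return len(set(arr)) == 1
--
-- def is_sorted(arr):
--     return arr == sorted(arr) or arr == sorted(arr, reverse=True)
-- ===== SOURCE B (Python) =====
-- def find_smallest_subarray(arr):
--     n = len(arr)
--     asc = True
--     desc = True
--     for i in range(n - 1):
--         if arr[i] > arr[i + 1]:
--             asc = False
--         if arr[i] < arr[i + 1]:
--             desc = False
--     if asc or desc:
--         return [0, 0]
--
--     # one left-to-right pass with a running maximum: last index below the
--     # running max is the right edge of the window
--     end = 0
--     running_max = arr[0]
--     for i in range(1, n):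
--         if arr[i] < running_max:
--             end = i
--         else:
--             running_max = arr[i]
--
--     # one right-to-left pass with a running minimum: first index above the
--     # running min is the left edge of the window
--     start = n - 1
--     running_min = arr[n - 1]
--     for i in reversed(range(n - 1)):
--         if arr[i] > running_min:
--             start = i
--         else:
--             running_min = arr[i]
--
--     return [start, end]
-- ===== Notes on version B (the rewrite author's own statement) =====
-- stated objective: faster
-- what changed: Replaces the sorted()/set()-based sortedness test with linear ascending/descending scans and replaces the four boundary while-loops plus window min/max with two single passes (running maximum left-to-right fixes the right edge, running minimum right-to-left fixes the left edge).
import Mathlib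
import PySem

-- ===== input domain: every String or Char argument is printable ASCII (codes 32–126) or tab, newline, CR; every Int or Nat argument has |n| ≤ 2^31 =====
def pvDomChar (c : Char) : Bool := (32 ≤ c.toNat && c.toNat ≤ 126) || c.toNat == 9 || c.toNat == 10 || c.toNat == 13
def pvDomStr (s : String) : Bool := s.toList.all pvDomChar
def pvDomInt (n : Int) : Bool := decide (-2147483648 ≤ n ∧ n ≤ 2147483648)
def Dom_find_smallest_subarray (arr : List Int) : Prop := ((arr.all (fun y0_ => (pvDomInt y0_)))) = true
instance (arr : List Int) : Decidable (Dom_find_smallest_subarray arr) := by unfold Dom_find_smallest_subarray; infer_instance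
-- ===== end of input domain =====

-- B replaces A's sorted()/set() sortedness test and four boundary while-loops by three linear
-- passes (ascending/descending scan, running-max pass, running-min pass); measured objective: faster.


-- ===== PORT A =====
-- all_same(arr): len(set(arr)) == 1
def pvAllSame (arr : List Int) : Bool := PySem.List.len (PySem.Set.ofList arr) == 1

-- is_sorted(arr): arr == sorted(arr) or arr == sorted(arr, reverse=True)
def pvIsSorted (arr : List Int) : Bool :=
  decide (arr = PySem.List.sorted arr (fun x => x)) ||
  decide (arr = PySem.List.sorted arr (fun x => x) true)

-- the four while loops of A; f i = arr[i] (every index A reads is in range, so List.getD is exact)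
-- while start < n - 1 and arr[start] <= arr[start + 1]: start += 1
def pvPhase1 (f : Nat → Int) (n s : Nat) : Nat :=
  if s < n - 1 ∧ f s ≤ f (s + 1) then pvPhase1 f n (s + 1) else s
  termination_by n - 1 - s
  decreasing_by omega

-- while end > 0 and arr[end] >= arr[end - 1]: end -= 1
def pvPhase2 (f : Nat → Int) (e : Nat) : Nat :=
  if 0 < e ∧ f (e - 1) ≤ f e then pvPhase2 f (e - 1) else e
  termination_by e
  decreasing_by omega

-- while start > 0 and arr[start - 1] > subarray_min: start -= 1
def pvPhase3 (f : Nat → Int) (m : Int) (s : Nat) : Nat :=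
  if 0 < s ∧ m < f (s - 1) then pvPhase3 f m (s - 1) else s
  termination_by s
  decreasing_by omega

-- while end < n - 1 and arr[end + 1] < subarray_max: end += 1
def pvPhase4 (f : Nat → Int) (M : Int) (n e : Nat) : Nat :=
  if e < n - 1 ∧ f (e + 1) < M then pvPhase4 f M n (e + 1) else e
  termination_by n - 1 - e
  decreasing_by omega

def find_smallest_subarray (arr : List Int) : List Int :=
  if pvAllSame arr || pvIsSorted arr then [0, 0] else
  let n := arr.length
  let f := fun i => arr.getD i 0
  let s0 := pvPhase1 f n 0
  let e0 := pvPhase2 f (n - 1)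
  let sub := PySem.List.slice arr (some (s0 : Int)) (some ((e0 : Int) + 1))
  -- min(...) / max(...): the slice is nonempty whenever this branch runs, so the default is never used
  let m := (PySem.List.min? sub (fun x => x)).getD 0
  let M := (PySem.List.max? sub (fun x => x)).getD 0
  [(pvPhase3 f m s0 : Int), (pvPhase4 f M n e0 : Int)]

-- ===== PORT B =====
-- for i in range(n-1): asc/desc flags
def pvScanSorted (f : Nat → Int) (n : Nat) : Bool × Bool :=
  (List.range (n - 1)).foldl
    (fun p i => ((if f (i + 1) < f i then false else p.1), (if f i < f (i + 1) then false else p.2)))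
    (true, true)

-- for i in range(1, n): running-max pass, (end, running_max)
def pvEndPass (f : Nat → Int) (n : Nat) : Nat × Int :=
  (List.range' 1 (n - 1)).foldl (fun p i => if f i < p.2 then (i, p.2) else (p.1, f i)) (0, f 0)

-- for i in reversed(range(n - 1)): running-min pass, (start, running_min)
def pvStartPass (f : Nat → Int) (n : Nat) : Nat × Int :=
  ((List.range (n - 1)).reverse).foldl (fun p i => if p.2 < f i then (i, p.2) else (p.1, f i))
    (n - 1, f (n - 1))

def find_smallest_subarray_alt (arr : List Int) : List Int :=
  let n := arr.length
  let f := fun i => arr.getD i 0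
  let ad := pvScanSorted f n
  if ad.1 || ad.2 then [0, 0] else
  [((pvStartPass f n).1 : Int), ((pvEndPass f n).1 : Int)]

-- ===== PRECONDITION & SPEC =====
def Spec_find_smallest_subarray (arr : List Int) (out : List Int) : Prop := out = find_smallest_subarray_alt arr
instance (arr : List Int) (out : List Int) : Decidable (Spec_find_smallest_subarray arr out) := by unfold Spec_find_smallest_subarray; infer_instance

-- ===== CLAIM (what is proved, stated in full; the proofs are below) =====
def Claim_equal_find_smallest_subarray : Prop := ∀ (arr : List Int), Dom_find_smallest_subarray arr → Spec_find_smallest_subarray arr (find_smallest_subarray arr)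

-- ===== LEMMAS AND PROOFS =====

-- running maximum / minimum of f over the indices a, a+1, …, a+k
def pvRMax (f : Nat → Int) (a : Nat) : Nat → Int
  | 0 => f a
  | k + 1 => max (pvRMax f a k) (f (a + k + 1))

def pvRMin (f : Nat → Int) (a : Nat) : Nat → Int
  | 0 => f a
  | k + 1 => min (pvRMin f a k) (f (a + k + 1))

theorem pvRMax_left (f : Nat → Int) (a k : Nat) :
    pvRMax f a (k + 1) = max (f a) (pvRMax f (a + 1) k) := by
  induction k with
  | zero => simp [pvRMax]
  | succ k ih =>
      rw [show pvRMax f a (k + 1 + 1) = max (pvRMax f a (k + 1)) (f (a + (k + 1) + 1)) from rfl, ih,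
        show pvRMax f (a + 1) (k + 1) = max (pvRMax f (a + 1) k) (f (a + 1 + k + 1)) from rfl,
        show a + 1 + k + 1 = a + (k + 1) + 1 from by omega, max_assoc]

theorem pvLeRMax (f : Nat → Int) (a k t : Nat) (h : t ≤ k) : f (a + t) ≤ pvRMax f a k := by
  induction k with
  | zero => simp [pvRMax, show t = 0 by omega]
  | succ k ih =>
      rcases Nat.lt_or_ge t (k + 1) with h' | h'
      · exact le_trans (ih (by omega)) (le_max_left _ _)
      · have : t = k + 1 := by omega
        subst this
        exact le_trans (le_of_eq (by ring_nf)) (le_max_right (pvRMax f a k) (f (a + k + 1)))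

theorem pvRMaxLe (f : Nat → Int) (a k : Nat) (c : Int) (h : ∀ t, t ≤ k → f (a + t) ≤ c) :
    pvRMax f a k ≤ c := by
  induction k with
  | zero => simpa [pvRMax] using h 0 (by omega)
  | succ k ih =>
      simp only [pvRMax, max_le_iff]
      exact ⟨ih (fun t ht => h t (by omega)), by simpa [show a + k + 1 = a + (k + 1) by omega] using h (k + 1) le_rfl⟩

theorem pvRMinFlip (f : Nat → Int) (n : Nat) :
    ∀ a k, a + k ≤ n - 1 →
      pvRMin f a k = -(pvRMax (fun i => -(f (n - 1 - i))) (n - 1 - (a + k)) k) := by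
  intro a k
  induction k generalizing a with
  | zero =>
      intro h
      simp only [pvRMin, pvRMax, neg_neg]
      rw [show n - 1 - (n - 1 - (a + 0)) = a by omega]
  | succ k ih =>
      intro h
      have hb : n - 1 - (a + (k + 1)) + 1 = n - 1 - (a + k) := by omega
      rw [show pvRMin f a (k + 1) = min (pvRMin f a k) (f (a + k + 1)) from rfl,
        pvRMax_left, neg_sup, hb, ← ih a (by omega), neg_neg,
        show n - 1 - (n - 1 - (a + (k + 1))) = a + k + 1 by omega]
      exact min_comm _ _

-- slice / min? / max? bridge
theorem pvWindowEq (arr : List Int) (s e : Nat) (hse : s ≤ e) (he : e < arr.length) :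
    PySem.List.slice arr (some (s : Int)) (some ((e : Int) + 1)) =
      (List.range' s (e + 1 - s)).map (fun i => arr.getD i 0) := by
  have hcast : ((e : Int) + 1) = ((e + 1 : Nat) : Int) := by push_cast; ring
  rw [hcast, PySem.List.slice_natCast]
  apply List.ext_getElem
  · simp; omega
  · intro i h1 h2
    have hlt : s + i < arr.length := by
      simp at h1; omega
    simp only [List.getElem_take, List.getElem_drop, List.getElem_map, List.getElem_range']
    rw [List.getD_eq_getElem arr 0 (by omega : s + 1 * i < arr.length)]
    congr 1
    omega

theorem pvFoldlMaxRange (f : Nat → Int) : ∀ k s, ((List.range' (s + 1) k).map f).foldl max (f s) = pvRMax f s k := by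
  intro k
  induction k with
  | zero => intro s; rfl
  | succ k ih =>
      intro s
      rw [List.range'_concat, List.map_append, List.foldl_append, ih s]
      simp only [List.map_cons, List.map_nil, List.foldl_cons, List.foldl_nil]
      rw [show s + 1 + 1 * k = s + k + 1 by omega]
      rfl

theorem pvFoldlMinRange (f : Nat → Int) : ∀ k s, ((List.range' (s + 1) k).map f).foldl min (f s) = pvRMin f s k := by
  intro k
  induction k with
  | zero => intro s; rfl
  | succ k ih =>
      intro s
      rw [List.range'_concat, List.map_append, List.foldl_append, ih s]
      simp only [List.map_cons, List.map_nil, List.foldl_cons, List.foldl_nil]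
      rw [show s + 1 + 1 * k = s + k + 1 by omega]
      rfl

theorem pvMaxWindow (f : Nat → Int) (s k : Nat) :
    PySem.List.max? ((List.range' s (k + 1)).map f) (fun x => x) = some (pvRMax f s k) := by
  rw [List.range'_succ, List.map_cons, PySem.List.max?_id_cons, pvFoldlMaxRange]

theorem pvMinWindow (f : Nat → Int) (s k : Nat) :
    PySem.List.min? ((List.range' s (k + 1)).map f) (fun x => x) = some (pvRMin f s k) := by
  rw [List.range'_succ, List.map_cons, PySem.List.min?_id_cons, pvFoldlMinRange]

-- monotone chain
theorem pvMonoChain (f : Nat → Int) (a b : Nat) (h : ∀ k, a ≤ k → k + 1 ≤ b → f k ≤ f (k + 1)) :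
    ∀ i j, a ≤ i → i ≤ j → j ≤ b → f i ≤ f j := by
  intro i j hai hij hjb
  induction j, hij using Nat.le_induction with
  | base => exact le_rfl
  | succ j hij ih => exact le_trans (ih (by omega)) (h j (by omega) (by omega))

-- phase specifications
theorem pvPhase1_spec (f : Nat → Int) (n : Nat) (Hd : ∃ i, i < n - 1 ∧ f (i + 1) < f i)
    (s : Nat) (hinv : ∀ k, k < s → f k ≤ f (k + 1)) :
    (∀ k, k < pvPhase1 f n s → f k ≤ f (k + 1)) ∧ pvPhase1 f n s < n - 1 ∧
      f (pvPhase1 f n s + 1) < f (pvPhase1 f n s) := by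
  obtain ⟨i0, hi0, hdi0⟩ := Hd
  suffices h : ∀ d s, n - 1 - s ≤ d → (∀ k, k < s → f k ≤ f (k + 1)) →
      (∀ k, k < pvPhase1 f n s → f k ≤ f (k + 1)) ∧ pvPhase1 f n s < n - 1 ∧
        f (pvPhase1 f n s + 1) < f (pvPhase1 f n s) by
    exact h _ s le_rfl hinv
  intro d
  induction d with
  | zero =>
      intro s hd hinv'
      exact absurd (hinv' i0 (by omega)) (not_le.mpr hdi0)
  | succ d ih =>
      intro s hd hinv'
      rw [pvPhase1]
      by_cases hc : s < n - 1 ∧ f s ≤ f (s + 1)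
      · rw [if_pos hc]
        exact ih (s + 1) (by omega) (fun k hk => by
          rcases Nat.lt_or_ge k s with h' | h'
          · exact hinv' k h'
          · rw [show k = s by omega]; exact hc.2)
      · rw [if_neg hc]
        push Not at hc
        by_cases h1 : s < n - 1
        · exact ⟨hinv', h1, hc h1⟩
        · exact absurd (hinv' i0 (by omega)) (not_le.mpr hdi0)

theorem pvPhase2_symm (f g : Nat → Int) (n : Nat) (Hg : ∀ i, i ≤ n - 1 → g i = -(f (n - 1 - i))) :
    ∀ e, e ≤ n - 1 → pvPhase2 f e = n - 1 - pvPhase1 g n (n - 1 - e) := by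
  intro e
  induction e using Nat.strong_induction_on with
  | _ e ih =>
      intro he
      rw [pvPhase2, pvPhase1]
      by_cases hc : 0 < e ∧ f (e - 1) ≤ f e
      · have hc' : n - 1 - e < n - 1 ∧ g (n - 1 - e) ≤ g (n - 1 - e + 1) := by
          refine ⟨by omega, ?_⟩
          rw [Hg _ (by omega), Hg _ (by omega),
            show n - 1 - (n - 1 - e) = e by omega,
            show n - 1 - (n - 1 - e + 1) = e - 1 by omega]
          exact neg_le_neg hc.2
        rw [if_pos hc, if_pos hc', show n - 1 - e + 1 = n - 1 - (e - 1) by omega]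
        exact ih (e - 1) (by omega) (by omega)
      · have hc' : ¬ (n - 1 - e < n - 1 ∧ g (n - 1 - e) ≤ g (n - 1 - e + 1)) := by
          rintro ⟨h1, h2⟩
          rw [Hg _ (by omega), Hg _ (by omega),
            show n - 1 - (n - 1 - e) = e by omega,
            show n - 1 - (n - 1 - e + 1) = e - 1 by omega] at h2
          exact hc ⟨by omega, neg_le_neg_iff.mp h2⟩
        rw [if_neg hc, if_neg hc']
        omega

theorem pvPhase3_symm (f g : Nat → Int) (n : Nat) (m : Int)
    (Hg : ∀ i, i ≤ n - 1 → g i = -(f (n - 1 - i))) :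
    ∀ s, s ≤ n - 1 → pvPhase3 f m s = n - 1 - pvPhase4 g (-m) n (n - 1 - s) := by
  intro s
  induction s using Nat.strong_induction_on with
  | _ s ih =>
      intro hs
      rw [pvPhase3, pvPhase4]
      by_cases hc : 0 < s ∧ m < f (s - 1)
      · have hc' : n - 1 - s < n - 1 ∧ g (n - 1 - s + 1) < -m := by
          refine ⟨by omega, ?_⟩
          rw [Hg _ (by omega), show n - 1 - (n - 1 - s + 1) = s - 1 by omega]
          exact neg_lt_neg hc.2
        rw [if_pos hc, if_pos hc', show n - 1 - s + 1 = n - 1 - (s - 1) by omega]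
        exact ih (s - 1) (by omega) (by omega)
      · have hc' : ¬ (n - 1 - s < n - 1 ∧ g (n - 1 - s + 1) < -m) := by
          rintro ⟨h1, h2⟩
          rw [Hg _ (by omega), show n - 1 - (n - 1 - s + 1) = s - 1 by omega] at h2
          exact hc ⟨by omega, neg_lt_neg_iff.mp h2⟩
        rw [if_neg hc, if_neg hc']
        omega

theorem pvPhase4_spec (f : Nat → Int) (M : Int) (n : Nat) :
    ∀ e, e ≤ n - 1 → e ≤ pvPhase4 f M n e ∧ pvPhase4 f M n e ≤ n - 1 ∧
      (∀ k, e < k → k ≤ pvPhase4 f M n e → f k < M) ∧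
      (pvPhase4 f M n e = n - 1 ∨ M ≤ f (pvPhase4 f M n e + 1)) := by
  suffices h : ∀ d e, n - 1 - e ≤ d → e ≤ n - 1 →
      e ≤ pvPhase4 f M n e ∧ pvPhase4 f M n e ≤ n - 1 ∧
        (∀ k, e < k → k ≤ pvPhase4 f M n e → f k < M) ∧
        (pvPhase4 f M n e = n - 1 ∨ M ≤ f (pvPhase4 f M n e + 1)) by
    intro e he; exact h _ e le_rfl he
  intro d
  induction d with
  | zero =>
      intro e hd he
      have hc : ¬ (e < n - 1 ∧ f (e + 1) < M) := by rintro ⟨h1, _⟩; omega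
      rw [pvPhase4, if_neg hc]
      exact ⟨le_rfl, he, fun k h1 h2 => by omega, Or.inl (by omega)⟩
  | succ d ih =>
      intro e hd he
      rw [pvPhase4]
      by_cases hc : e < n - 1 ∧ f (e + 1) < M
      · rw [if_pos hc]
        obtain ⟨ha, hb, hk, hl⟩ := ih (e + 1) (by omega) (by omega)
        refine ⟨by omega, hb, fun k h1 h2 => ?_, hl⟩
        rcases Nat.lt_or_ge k (e + 2) with h' | h'
        · rw [show k = e + 1 by omega]; exact hc.2
        · exact hk k (by omega) h2
      · rw [if_neg hc]
        refine ⟨le_rfl, he, fun k h1 h2 => by omega, ?_⟩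
        by_cases h1 : e < n - 1
        · right; push Not at hc; exact hc h1
        · left; omega

-- B's left-to-right pass: second component is the running max, first the last index below it
theorem pvEndPass_spec (f : Nat → Int) (j : Nat) :
    ((List.range' 1 j).foldl (fun p i => if f i < p.2 then (i, p.2) else (p.1, f i)) (0, f 0)).2 = pvRMax f 0 j ∧
    (((List.range' 1 j).foldl (fun p i => if f i < p.2 then (i, p.2) else (p.1, f i)) (0, f 0)).1 = 0 ∨
      (1 ≤ ((List.range' 1 j).foldl (fun p i => if f i < p.2 then (i, p.2) else (p.1, f i)) (0, f 0)).1 ∧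
        f (((List.range' 1 j).foldl (fun p i => if f i < p.2 then (i, p.2) else (p.1, f i)) (0, f 0)).1) <
          pvRMax f 0 (((List.range' 1 j).foldl (fun p i => if f i < p.2 then (i, p.2) else (p.1, f i)) (0, f 0)).1 - 1))) ∧
    (∀ i, ((List.range' 1 j).foldl (fun p i => if f i < p.2 then (i, p.2) else (p.1, f i)) (0, f 0)).1 < i → i ≤ j →
      pvRMax f 0 (i - 1) ≤ f i) ∧
    ((List.range' 1 j).foldl (fun p i => if f i < p.2 then (i, p.2) else (p.1, f i)) (0, f 0)).1 ≤ j := by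
  induction j with
  | zero =>
      refine ⟨rfl, Or.inl rfl, fun i h1 h2 => by omega, le_rfl⟩
  | succ j ih =>
      rcases hp : ((List.range' 1 j).foldl (fun p i => if f i < p.2 then (i, p.2) else (p.1, f i)) (0, f 0)) with ⟨E, r⟩
      rw [hp] at ih
      obtain ⟨ih1, ih2, ih3, ih4⟩ := ih
      simp only at ih1 ih2 ih3 ih4
      subst ih1
      rw [List.range'_concat, List.foldl_append, show (1 : Nat) + 1 * j = j + 1 by omega, hp]
      simp only [List.foldl_cons, List.foldl_nil]
      by_cases hc : f (j + 1) < pvRMax f 0 j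
      · rw [if_pos hc]
        refine ⟨?_, Or.inr ⟨by omega, ?_⟩, fun i h1 h2 => by omega, by omega⟩
        · show pvRMax f 0 j = pvRMax f 0 (j + 1)
          rw [show pvRMax f 0 (j + 1) = max (pvRMax f 0 j) (f (0 + j + 1)) from rfl,
            show (0 : Nat) + j + 1 = j + 1 by omega]
          exact (max_eq_left (le_of_lt hc)).symm
        · simpa using hc
      · rw [if_neg hc]
        push Not at hc
        have hmax : pvRMax f 0 (j + 1) = f (j + 1) := by
          rw [show pvRMax f 0 (j + 1) = max (pvRMax f 0 j) (f (0 + j + 1)) from rfl,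
            show (0 : Nat) + j + 1 = j + 1 by omega]
          exact max_eq_right hc
        refine ⟨hmax.symm, ih2, fun i h1 h2 => ?_, by omega⟩
        rcases Nat.lt_or_ge i (j + 1) with h' | h'
        · exact ih3 i h1 (by omega)
        · rw [show i = j + 1 by omega]; simpa using hc

theorem pvScanSorted_spec (f : Nat → Int) (n : Nat) :
    pvScanSorted f n =
      (decide (∀ i, i < n - 1 → f i ≤ f (i + 1)), decide (∀ i, i < n - 1 → f (i + 1) ≤ f i)) := by
  suffices h : ∀ k, (List.range k).foldl
      (fun p i => ((if f (i + 1) < f i then false else p.1), (if f i < f (i + 1) then false else p.2)))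
      (true, true) = (decide (∀ i, i < k → f i ≤ f (i + 1)), decide (∀ i, i < k → f (i + 1) ≤ f i)) by
    exact h (n - 1)
  intro k
  induction k with
  | zero => simp
  | succ k ih =>
      rw [List.range_succ, List.foldl_append, ih]
      simp only [List.foldl_cons, List.foldl_nil, Prod.mk.injEq]
      constructor
      · by_cases hc : f (k + 1) < f k
        · rw [if_pos hc]
          symm
          simp only [decide_eq_false_iff_not]
          intro hP
          exact absurd (hP k (by omega)) (not_le.mpr hc)
        · rw [if_neg hc]
          push Not at hc
          apply decide_eq_decide.mpr
          constructor
          · intro hP i hi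
            rcases Nat.lt_or_ge i k with h' | h'
            · exact hP i h'
            · rw [show i = k by omega]; exact hc
          · exact fun hP i hi => hP i (by omega)
      · by_cases hc : f k < f (k + 1)
        · rw [if_pos hc]
          symm
          simp only [decide_eq_false_iff_not]
          intro hP
          exact absurd (hP k (by omega)) (not_le.mpr hc)
        · rw [if_neg hc]
          push Not at hc
          apply decide_eq_decide.mpr
          constructor
          · intro hP i hi
            rcases Nat.lt_or_ge i k with h' | h'
            · exact hP i h'
            · rw [show i = k by omega]; exact hc
          · exact fun hP i hi => hP i (by omega)

theorem pvStartPass_symm (f : Nat → Int) (n : Nat) :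
    pvStartPass f n =
      ((n - 1) - (pvEndPass (fun i => -(f (n - 1 - i))) n).1, -(pvEndPass (fun i => -(f (n - 1 - i))) n).2) := by
  have hfold : ∀ (l : List Nat) (q1 : Nat) (q2 : Int),
      ((l.map (fun i => n - 1 - i)).foldl (fun p i => if p.2 < f i then (i, p.2) else (p.1, f i))
        (n - 1 - q1, -q2)) =
      (n - 1 - (l.foldl (fun (p : Nat × Int) i => if (fun i => -(f (n - 1 - i))) i < p.2 then (i, p.2)
          else (p.1, (fun i => -(f (n - 1 - i))) i)) (q1, q2)).1,
       -(l.foldl (fun (p : Nat × Int) i => if (fun i => -(f (n - 1 - i))) i < p.2 then (i, p.2)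
          else (p.1, (fun i => -(f (n - 1 - i))) i)) (q1, q2)).2) := by
    intro l
    induction l with
    | nil => intro q1 q2; rfl
    | cons i l ihl =>
        intro q1 q2
        simp only [List.map_cons, List.foldl_cons]
        by_cases hc : -(f (n - 1 - i)) < q2
        · rw [if_pos (show -q2 < f (n - 1 - i) by omega), if_pos hc]
          exact ihl i q2
        · rw [if_neg (show ¬ -q2 < f (n - 1 - i) by omega), if_neg hc]
          have := ihl q1 (-(f (n - 1 - i)))
          simpa using this
  have hlist : (List.range (n - 1)).reverse = (List.range' 1 (n - 1)).map (fun i => n - 1 - i) := by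
    apply List.ext_getElem
    · simp
    · intro i h1 h2
      simp only [List.length_reverse, List.length_range] at h1
      rw [List.getElem_reverse, List.getElem_map, List.getElem_range', List.getElem_range]
      simp only [List.length_range]
      omega
  have h0 : ((n : Nat) - 1, f (n - 1)) = (n - 1 - 0, -(-(f (n - 1 - 0)))) := by simp
  rw [pvStartPass, hlist, h0, hfold (List.range' 1 (n - 1)) 0 (-(f (n - 1 - 0)))]
  rfl

-- location of phase1/phase2 and nonemptiness of the window
theorem pvE0_spec (f : Nat → Int) (n : Nat) (Hd : ∃ i, i < n - 1 ∧ f (i + 1) < f i) :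
    0 < pvPhase2 f (n - 1) ∧ pvPhase2 f (n - 1) ≤ n - 1 ∧
      f (pvPhase2 f (n - 1)) < f (pvPhase2 f (n - 1) - 1) ∧
      ∀ j, pvPhase2 f (n - 1) ≤ j → j + 1 ≤ n - 1 → f j ≤ f (j + 1) := by
  have Hg : ∀ i, i ≤ n - 1 → (fun i => -(f (n - 1 - i))) i = -(f (n - 1 - i)) := fun _ _ => rfl
  have hsym := pvPhase2_symm f (fun i => -(f (n - 1 - i))) n Hg (n - 1) le_rfl
  rw [Nat.sub_self] at hsym
  obtain ⟨i, hi, hdi⟩ := Hd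
  have Hdg : ∃ j, j < n - 1 ∧ (fun i => -(f (n - 1 - i))) (j + 1) < (fun i => -(f (n - 1 - i))) j := by
    refine ⟨n - 2 - i, by omega, ?_⟩
    show -(f (n - 1 - (n - 2 - i + 1))) < -(f (n - 1 - (n - 2 - i)))
    rw [show n - 1 - (n - 2 - i + 1) = i by omega, show n - 1 - (n - 2 - i) = i + 1 by omega]
    exact neg_lt_neg hdi
  obtain ⟨hinv, hlt, hdesc⟩ := pvPhase1_spec (fun i => -(f (n - 1 - i))) n Hdg 0 (by omega)
  refine ⟨by omega, by omega, ?_, ?_⟩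
  · rw [show n - 1 - (pvPhase1 (fun i => -(f (n - 1 - i))) n 0 + 1)
        = pvPhase2 f (n - 1) - 1 by omega,
      show n - 1 - pvPhase1 (fun i => -(f (n - 1 - i))) n 0 = pvPhase2 f (n - 1) by omega] at hdesc
    omega
  · intro j hj hj1
    have := hinv (n - 2 - j) (by omega)
    rw [show n - 1 - (n - 2 - j) = j + 1 by omega,
      show n - 1 - (n - 2 - j + 1) = j by omega] at this
    omega

theorem pvS0E0 (f : Nat → Int) (n : Nat) (Hd : ∃ i, i < n - 1 ∧ f (i + 1) < f i) :
    pvPhase1 f n 0 < pvPhase2 f (n - 1) ∧ pvPhase2 f (n - 1) ≤ n - 1 ∧ 2 ≤ n := by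
  obtain ⟨he0pos, he0le, hdesc0, hsuffix⟩ := pvE0_spec f n Hd
  obtain ⟨hinv, hs0lt, hs0desc⟩ := pvPhase1_spec f n Hd 0 (by omega)
  refine ⟨?_, he0le, by omega⟩
  by_contra h
  have := hsuffix (pvPhase1 f n 0) (by omega) (by omega)
  omega

-- central lemma: A's extended right edge equals B's single running-max pass
theorem pvEndEq (f : Nat → Int) (n : Nat) (Hd : ∃ i, i < n - 1 ∧ f (i + 1) < f i) :
    pvPhase4 f (pvRMax f (pvPhase1 f n 0) (pvPhase2 f (n - 1) - pvPhase1 f n 0)) n (pvPhase2 f (n - 1)) =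
      (pvEndPass f n).1 := by
  obtain ⟨he0pos, he0le, hdesc0, hsuffix⟩ := pvE0_spec f n Hd
  obtain ⟨hinv, hs0lt, hs0desc⟩ := pvPhase1_spec f n Hd 0 (by omega)
  obtain ⟨hs0e0, -, h2n⟩ := pvS0E0 f n Hd
  set s0 := pvPhase1 f n 0 with hs0
  set e0 := pvPhase2 f (n - 1) with he0
  set M := pvRMax f s0 (e0 - s0) with hMdef
  have hM : pvRMax f 0 e0 = M := by
    apply le_antisymm
    · apply pvRMaxLe
      intro t ht
      rw [Nat.zero_add]
      have hs0M : f s0 ≤ M := by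
        have := pvLeRMax f s0 (e0 - s0) 0 (by omega)
        rwa [Nat.add_zero] at this
      rcases Nat.lt_or_ge s0 t with h' | h'
      · have := pvLeRMax f s0 (e0 - s0) (t - s0) (by omega)
        rwa [show s0 + (t - s0) = t by omega] at this
      · have h1 : f t ≤ f s0 :=
          pvMonoChain f 0 s0 (fun k hk1 hk2 => hinv k (by omega)) t s0 (by omega) h' le_rfl
        omega
    · apply pvRMaxLe
      intro t ht
      have := pvLeRMax f 0 e0 (s0 + t) (by omega)
      rwa [Nat.zero_add] at this
  obtain ⟨hp4a, hp4b, hp4c, hp4d⟩ := pvPhase4_spec f M n e0 he0le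
  set e := pvPhase4 f M n e0 with he
  have hEP : pvEndPass f n =
      (List.range' 1 (n - 1)).foldl (fun p i => if f i < p.2 then (i, p.2) else (p.1, f i)) (0, f 0) := rfl
  obtain ⟨hE1, hE2, hE3, hE4⟩ := pvEndPass_spec f (n - 1)
  rw [hEP]
  set E := ((List.range' 1 (n - 1)).foldl (fun p i => if f i < p.2 then (i, p.2) else (p.1, f i)) (0, f 0)).1 with hE
  have hmono : ∀ a b, e0 ≤ a → a ≤ b → b ≤ n - 1 → f a ≤ f b :=
    pvMonoChain f e0 (n - 1) (fun k hk1 hk2 => hsuffix k hk1 hk2)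
  have hpm : ∀ a b : Nat, a ≤ b → pvRMax f 0 a ≤ pvRMax f 0 b := by
    intro a b hab
    apply pvRMaxLe
    intro t ht
    exact pvLeRMax f 0 b t (by omega)
  have hfe0 : f e0 < pvRMax f 0 (e0 - 1) := by
    have h1 := pvLeRMax f 0 (e0 - 1) (e0 - 1) le_rfl
    rw [Nat.zero_add] at h1
    omega
  have haE : e0 ≤ E := by
    by_contra hlt'
    have := hE3 e0 (by omega) (by omega)
    omega
  have hbE : E ≤ e := by
    by_contra h'
    push Not at h'
    have hMle : M ≤ f (e + 1) := by
      rcases hp4d with h4 | h4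
      · omega
      · exact h4
    rcases hE2 with h2 | ⟨h2a, h2b⟩
    · omega
    · have hgoal : pvRMax f 0 (E - 1) ≤ f E := by
        apply pvRMaxLe
        intro t ht
        rw [Nat.zero_add]
        rcases Nat.lt_or_ge e0 t with h'' | h''
        · exact hmono t E (by omega) (by omega) (by omega)
        · have h1 := pvLeRMax f 0 e0 t (by omega)
          rw [Nat.zero_add] at h1
          have hcm : f (e + 1) ≤ f E := hmono (e + 1) E (by omega) (by omega) (by omega)
          omega
      omega
  have hcE : e ≤ E := by
    by_contra h'
    push Not at h'
    have h1 : f e < M := hp4c e (by omega) le_rfl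
    have h2 : pvRMax f 0 e0 ≤ pvRMax f 0 (e - 1) := hpm e0 (e - 1) (by omega)
    have h3 : pvRMax f 0 (e - 1) ≤ f e := hE3 e (by omega) (by omega)
    omega
  omega

-- condition bridges
theorem pvPairwiseLe_iff (arr : List Int) :
    arr.Pairwise (fun a b => a ≤ b) ↔ ∀ i, i + 1 < arr.length → arr.getD i 0 ≤ arr.getD (i + 1) 0 := by
  constructor
  · intro h i hi
    rw [List.getD_eq_getElem arr 0 hi, List.getD_eq_getElem arr 0 (show i < arr.length by omega)]
    exact List.pairwise_iff_getElem.mp h i (i + 1) (by omega) hi (by omega)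
  · intro h
    rw [List.pairwise_iff_getElem]
    intro i j hi hj hij
    have := pvMonoChain (fun t => arr.getD t 0) 0 (arr.length - 1)
      (fun k hk1 hk2 => h k (by omega)) i j (by omega) (by omega) (by omega)
    simp only [List.getD_eq_getElem arr 0 hi, List.getD_eq_getElem arr 0 hj] at this
    exact this

theorem pvPairwiseGe_iff (arr : List Int) :
    arr.Pairwise (fun a b => b ≤ a) ↔ ∀ i, i + 1 < arr.length → arr.getD (i + 1) 0 ≤ arr.getD i 0 := by
  constructor
  · intro h i hi
    rw [List.getD_eq_getElem arr 0 hi, List.getD_eq_getElem arr 0 (show i < arr.length by omega)]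
    exact List.pairwise_iff_getElem.mp h i (i + 1) (by omega) hi (by omega)
  · intro h
    rw [List.pairwise_iff_getElem]
    intro i j hi hj hij
    have := pvMonoChain (fun t => -(arr.getD t 0)) 0 (arr.length - 1)
      (fun k hk1 hk2 => neg_le_neg (h k (by omega))) i j (by omega) (by omega) (by omega)
    simp only [List.getD_eq_getElem arr 0 hi, List.getD_eq_getElem arr 0 hj] at this
    omega

theorem pvIsSorted_iff (arr : List Int) :
    pvIsSorted arr = true ↔ (arr.Pairwise (fun a b => a ≤ b) ∨ arr.Pairwise (fun a b => b ≤ a)) := by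
  unfold pvIsSorted
  rw [Bool.or_eq_true, decide_eq_true_iff, decide_eq_true_iff]
  constructor
  · rintro (h | h)
    · left
      have := PySem.List.sorted_pairwise arr (fun x => x)
      rwa [← h] at this
    · right
      have := PySem.List.sorted_pairwise_rev arr (fun x => x)
      rwa [← h] at this
  · rintro (h | h)
    · exact Or.inl (PySem.List.sorted_eq_self_of_pairwise arr (fun x => x) h).symm
    · exact Or.inr (PySem.List.sorted_rev_eq_self_of_pairwise arr (fun x => x) h).symm

theorem pvAllSame_pairwise (arr : List Int) (h : pvAllSame arr = true) :
    arr.Pairwise (fun a b => a ≤ b) := by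
  unfold pvAllSame at h
  rw [beq_iff_eq, PySem.List.len_eq] at h
  have hlen : (PySem.Set.ofList arr).length = 1 := by exact_mod_cast h
  obtain ⟨x, hx⟩ := List.length_eq_one_iff.mp hlen
  rw [List.pairwise_iff_getElem]
  intro i j hi hj hij
  have h1 : arr[i] = x := by
    have := (PySem.Set.mem_ofList arr arr[i]).mpr (List.getElem_mem hi)
    rw [hx] at this
    simpa using this
  have h2 : arr[j] = x := by
    have := (PySem.Set.mem_ofList arr arr[j]).mpr (List.getElem_mem hj)
    rw [hx] at this
    simpa using this
  rw [h1, h2]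

-- ===== VERDICT (by name: the statement is the Claim_ definition above) =====
theorem find_smallest_subarray_spec : Claim_equal_find_smallest_subarray := by
  intro arr _
  unfold Spec_find_smallest_subarray
  simp only [find_smallest_subarray, find_smallest_subarray_alt]
  rw [pvScanSorted_spec]
  set n := arr.length with hn
  set f := fun i => arr.getD i 0 with hf
  simp only
  by_cases hP : (∀ i, i < n - 1 → arr.getD i 0 ≤ arr.getD (i + 1) 0) ∨
      (∀ i, i < n - 1 → arr.getD (i + 1) 0 ≤ arr.getD i 0)
  · have hsor : pvIsSorted arr = true := by
      rw [pvIsSorted_iff]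
      rcases hP with h | h
      · exact Or.inl ((pvPairwiseLe_iff arr).mpr (fun i hi => h i (by omega)))
      · exact Or.inr ((pvPairwiseGe_iff arr).mpr (fun i hi => h i (by omega)))
    have hcondB : (decide (∀ i, i < n - 1 → arr.getD i 0 ≤ arr.getD (i + 1) 0) ||
        decide (∀ i, i < n - 1 → arr.getD (i + 1) 0 ≤ arr.getD i 0)) = true := by
      rw [Bool.or_eq_true, decide_eq_true_iff, decide_eq_true_iff]
      exact hP
    rw [if_pos (show (pvAllSame arr || pvIsSorted arr) = true by simp [hsor]), if_pos hcondB]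
  · have hP1 : ¬ (∀ i, i < n - 1 → arr.getD i 0 ≤ arr.getD (i + 1) 0) := fun h => hP (Or.inl h)
    have hP2 : ¬ (∀ i, i < n - 1 → arr.getD (i + 1) 0 ≤ arr.getD i 0) := fun h => hP (Or.inr h)
    have hA : pvAllSame arr = false := by
      by_contra hx
      rw [Bool.not_eq_false] at hx
      exact hP1 (fun i hi => (pvPairwiseLe_iff arr).mp (pvAllSame_pairwise arr hx) i (by omega))
    have hS : pvIsSorted arr = false := by
      by_contra hx
      rw [Bool.not_eq_false] at hx
      rcases (pvIsSorted_iff arr).mp hx with h | h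
      · exact hP1 (fun i hi => (pvPairwiseLe_iff arr).mp h i (by omega))
      · exact hP2 (fun i hi => (pvPairwiseGe_iff arr).mp h i (by omega))
    rw [if_neg (by simp [hA, hS]), if_neg (by
      simp only [Bool.or_eq_true, decide_eq_true_iff]
      rintro (h | h)
      · exact hP1 h
      · exact hP2 h)]
    have Hd : ∃ i, i < n - 1 ∧ f (i + 1) < f i := by
      push Not at hP1
      obtain ⟨i, hi, hlt⟩ := hP1
      refine ⟨i, hi, ?_⟩
      simp only [hf]
      omega
    obtain ⟨hs0e0, he0le, h2n⟩ := pvS0E0 f n Hd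
    have hwin := pvWindowEq arr (pvPhase1 f n 0) (pvPhase2 f (n - 1)) (le_of_lt hs0e0) (by omega)
    rw [show pvPhase2 f (n - 1) + 1 - pvPhase1 f n 0
        = (pvPhase2 f (n - 1) - pvPhase1 f n 0) + 1 by omega, ← hf] at hwin
    rw [hwin, pvMinWindow, pvMaxWindow]
    simp only [Option.getD_some]
    -- right edge
    have hend := pvEndEq f n Hd
    rw [hend]
    -- left edge via the reverse-negate symmetry
    have Hg : ∀ i, i ≤ n - 1 → (fun i => -(f (n - 1 - i))) i = -(f (n - 1 - i)) := fun _ _ => rfl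
    have Hgf : ∀ i, i ≤ n - 1 → f i = -((fun i => -(f (n - 1 - i))) (n - 1 - i)) := by
      intro i hi
      show f i = -(-(f (n - 1 - (n - 1 - i))))
      rw [neg_neg, show n - 1 - (n - 1 - i) = i by omega]
    have Hdg : ∃ j, j < n - 1 ∧ (fun i => -(f (n - 1 - i))) (j + 1) < (fun i => -(f (n - 1 - i))) j := by
      obtain ⟨i, hi, hdi⟩ := Hd
      refine ⟨n - 2 - i, by omega, ?_⟩
      show -(f (n - 1 - (n - 2 - i + 1))) < -(f (n - 1 - (n - 2 - i)))
      rw [show n - 1 - (n - 2 - i + 1) = i by omega, show n - 1 - (n - 2 - i) = i + 1 by omega]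
      exact neg_lt_neg hdi
    have h3 := pvPhase3_symm f (fun i => -(f (n - 1 - i))) n
      (pvRMin f (pvPhase1 f n 0) (pvPhase2 f (n - 1) - pvPhase1 f n 0)) Hg (pvPhase1 f n 0) (by omega)
    have hflip := pvRMinFlip f n (pvPhase1 f n 0) (pvPhase2 f (n - 1) - pvPhase1 f n 0) (by omega)
    rw [show pvPhase1 f n 0 + (pvPhase2 f (n - 1) - pvPhase1 f n 0) = pvPhase2 f (n - 1) by omega] at hflip
    have hsymFG := pvPhase2_symm f (fun i => -(f (n - 1 - i))) n Hg (n - 1) le_rfl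
    rw [Nat.sub_self] at hsymFG
    have hsymGF := pvPhase2_symm (fun i => -(f (n - 1 - i))) f n Hgf (n - 1) le_rfl
    rw [Nat.sub_self] at hsymGF
    have hs0g := (pvPhase1_spec (fun i => -(f (n - 1 - i))) n Hdg 0 (by omega)).2.1
    have hendg := pvEndEq (fun i => -(f (n - 1 - i))) n Hdg
    rw [show pvPhase1 (fun i => -(f (n - 1 - i))) n 0 = n - 1 - pvPhase2 f (n - 1) by omega, hsymGF,
      show n - 1 - pvPhase1 f n 0 - (n - 1 - pvPhase2 f (n - 1))
        = pvPhase2 f (n - 1) - pvPhase1 f n 0 by omega] at hendg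
    rw [h3, hflip, neg_neg, hendg, pvStartPass_symm f n]
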